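-- pv_equiv track=rewrite | github.com/ChangmoKang/problem_solving | PG/코딩테스트_고득점_Kit/BruteForce/p1.py | solution
-- ===== SOURCE A (Python) =====
-- def solution(answers):
--     ways = [
--         [1, 2, 3, 4, 5],
--         [2, 1, 2, 3, 2, 4, 2, 5],
--         [3, 3, 1, 1, 2, 2, 4, 4, 5, 5]
--     ]
--
--     correct = [0] * len(ways)
--
--     for number, answer in enumerate(answers):
--         for way_index in range(len(ways)):
--             way = ways[way_index]
--             if answer == way[(number % len(way))]:
--                 correct[way_index] += 1
--
--     return [i + 1 for i in range(len(correct)) if correct[i] == max(correct)]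
-- ===== SOURCE B (Python) =====
-- def solution(answers):
--     ways = [
--         [1, 2, 3, 4, 5],
--         [2, 1, 2, 3, 2, 4, 2, 5],
--         [3, 3, 1, 1, 2, 2, 4, 4, 5, 5],
--     ]
--     scores = []
--     for pat in ways:
--         score = 0
--         rem = pat
--         for a in answers:
--             if not rem:
--                 rem = pat
--             if a == rem[0]:
--                 score += 1
--             rem = rem[1:]
--         scores.append(score)
--     m = max(scores)
--     return [i + 1 for i, s in enumerate(scores) if s == m]
-- ===== Notes on version B (the rewrite author's own statement) =====
-- stated objective: idiomatic
-- what changed: Replaces the single interleaved pass with modular indexing into a maintained correct-count array by three independent cyclic scans (each pattern consumed as a rotating remainder list, itertools.cycle style), then a max/enumerate selection.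
import Mathlib
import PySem

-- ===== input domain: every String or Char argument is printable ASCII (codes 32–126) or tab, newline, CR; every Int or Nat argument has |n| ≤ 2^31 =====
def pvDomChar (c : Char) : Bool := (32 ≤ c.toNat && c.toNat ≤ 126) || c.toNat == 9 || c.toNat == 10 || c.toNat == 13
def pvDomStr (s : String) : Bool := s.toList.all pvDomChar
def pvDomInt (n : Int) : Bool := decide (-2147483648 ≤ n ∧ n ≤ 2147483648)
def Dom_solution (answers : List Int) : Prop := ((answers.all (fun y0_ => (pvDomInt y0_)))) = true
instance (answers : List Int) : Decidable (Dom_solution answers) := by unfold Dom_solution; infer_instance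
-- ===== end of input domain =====

-- B replaces A's single interleaved pass (modular indexing into a maintained count array)
-- by three independent cyclic scans (rotating remainder list) plus a max/enumerate selection.

-- the three fixed answering patterns (shared data literal)
def pvWays : List (List Int) := [[1,2,3,4,5],[2,1,2,3,2,4,2,5],[3,3,1,1,2,2,4,4,5,5]]

-- ===== PORT A =====
-- literal transliteration of A: one pass over enumerate(answers), inner loop over the
-- three patterns, incrementing correct[way_index]; all indices are in range, so the
-- pyGetD/pySetD defaults are never used.
def solution (answers : List Int) : List Int :=
  let ways := pvWays
  let correct := List.replicate ways.length (0 : Int)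
  let correct :=
    (PySem.List.enumerate answers).foldl (fun correct na =>
      (PySem.List.pyRange 0 (ways.length : Int) 1).foldl (fun correct wayIndex =>
        let way := PySem.List.pyGetD pvWays wayIndex []
        if na.2 = PySem.List.pyGetD way (PySem.Int.mod na.1 (way.length : Int)) 0 then
          PySem.List.pySetD correct wayIndex (PySem.List.pyGetD correct wayIndex 0 + 1)
        else correct) correct) correct
  -- [i + 1 for i in range(len(correct)) if correct[i] == max(correct)]
  (PySem.List.pyRange 0 (correct.length : Int) 1).foldl (fun acc i =>
    match PySem.List.max? correct (fun x => x) with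
    | some m => if PySem.List.pyGetD correct i 0 = m then acc ++ [i + 1] else acc
    | none => acc) []

-- ===== PORT B =====
-- one cyclic scan of answers against pattern pat, consumed as a rotating remainder list
-- (the match's [] branch is unreachable: pat is one of the nonempty literals)
def cycScore (pat : List Int) (answers : List Int) : Int :=
  (answers.foldl (fun (st : Int × List Int) a =>
      let rem := if st.2.isEmpty then pat else st.2
      match rem with
      | [] => st
      | p :: rest => (if a = p then st.1 + 1 else st.1, rest)) (0, pat)).1

def solution_alt (answers : List Int) : List Int :=
  let scores := pvWays.map (fun pat => cycScore pat answers)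
  match PySem.List.max? scores (fun x => x) with
  | none => []
  | some m =>
    (PySem.List.enumerate scores).foldl
      (fun acc is => if is.2 = m then acc ++ [is.1 + 1] else acc) []

-- ===== PRECONDITION & SPEC =====
def Spec_solution (answers : List Int) (out : List Int) : Prop := out = solution_alt answers
instance (answers : List Int) (out : List Int) : Decidable (Spec_solution answers out) := by unfold Spec_solution; infer_instance

-- ===== CLAIM (what is proved, stated in full; the proofs are below) =====
def Claim_equal_solution : Prop := ∀ (answers : List Int), Dom_solution answers → Spec_solution answers (solution answers)

-- ===== LEMMAS AND PROOFS =====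

-- reference score: matches of the tail against pat cycled from offset m (m < pat.length)
def S (pat : List Int) : Nat → List Int → Int
  | _, [] => 0
  | m, a :: tl => (if a = pat.getD m 0 then 1 else 0) + S pat ((m+1) % pat.length) tl

-- loop invariant of B's cyclic scan: the remainder list is a suffix of the pattern
theorem cyc_inv (pat : List Int) (tl : List Int) :
    ∀ (c : Int) (m : Nat) (rem : List Int), m < pat.length →
      (rem = pat.drop m ∨ (m = 0 ∧ rem = [])) →
      (tl.foldl (fun (st : Int × List Int) a =>
          let rem := if st.2.isEmpty then pat else st.2
          match rem with
          | [] => st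
          | p :: rest => (if a = p then st.1 + 1 else st.1, rest)) (c, rem)).1
        = c + S pat m tl := by
  induction tl with
  | nil => intro c m rem _ _; simp [S]
  | cons a tl ih =>
    intro c m rem hm hrem
    have hrem' : (if rem.isEmpty then pat else rem) = pat.drop m := by
      rcases hrem with h | ⟨h0, h⟩
      · have hne2 : rem ≠ [] := by
          rw [h]; intro hc; rw [List.drop_eq_nil_iff] at hc; omega
        rw [if_neg (by simpa [List.isEmpty_iff] using hne2), h]
      · simp [h, h0]
    have hdrop : pat.drop m = pat[m] :: pat.drop (m+1) :=
      List.drop_eq_getElem_cons hm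
    simp only [List.foldl_cons, hrem', hdrop]
    have step : ∀ c' : Int,
        (tl.foldl (fun (st : Int × List Int) a =>
            let rem := if st.2.isEmpty then pat else st.2
            match rem with
            | [] => st
            | p :: rest => (if a = p then st.1 + 1 else st.1, rest))
          (c', pat.drop (m+1))).1 = c' + S pat ((m+1) % pat.length) tl := by
      intro c'
      by_cases h : m + 1 < pat.length
      · exact ih c' ((m+1) % pat.length) _ (Nat.mod_lt _ (by omega))
          (Or.inl (by rw [Nat.mod_eq_of_lt h]))
      · have hlen : m + 1 = pat.length := by omega
        exact ih c' ((m+1) % pat.length) _ (Nat.mod_lt _ (by omega))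
          (Or.inr ⟨by rw [hlen]; exact Nat.mod_self _, by rw [hlen, List.drop_length]⟩)
    show (tl.foldl _ ((if a = pat[m] then c + 1 else c), pat.drop (m+1))).1 = _
    rw [step]
    have hget : pat.getD m 0 = pat[m] := List.getD_eq_getElem _ _ hm
    simp only [S, hget]
    split_ifs <;> ring

theorem cycScore_eq (pat answers : List Int) (hp : pat ≠ []) :
    cycScore pat answers = S pat 0 answers := by
  unfold cycScore
  rw [cyc_inv pat answers 0 0 pat (by cases pat <;> simp_all) (Or.inl (by simp))]
  ring

-- one step of A's inner loop over the three patterns, on a 3-element count state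
theorem inner3 (n : Nat) (a x y z : Int) :
    (PySem.List.pyRange 0 (pvWays.length : Int) 1).foldl (fun correct wayIndex =>
        if a = PySem.List.pyGetD (PySem.List.pyGetD pvWays wayIndex [])
            (PySem.Int.mod (n : Int) ((PySem.List.pyGetD pvWays wayIndex []).length : Int)) 0 then
          PySem.List.pySetD correct wayIndex (PySem.List.pyGetD correct wayIndex 0 + 1)
        else correct) [x, y, z]
    = [x + (if a = List.getD [1,2,3,4,5] (n % 5) 0 then 1 else 0),
       y + (if a = List.getD [2,1,2,3,2,4,2,5] (n % 8) 0 then 1 else 0),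
       z + (if a = List.getD [3,3,1,1,2,2,4,4,5,5] (n % 10) 0 then 1 else 0)] := by
  rw [show PySem.List.pyRange 0 (pvWays.length : Int) 1 = [0,1,2] from by decide]
  simp only [List.foldl_cons, List.foldl_nil,
    show PySem.List.pyGetD pvWays 0 ([] : List Int) = [1,2,3,4,5] from by decide,
    show PySem.List.pyGetD pvWays 1 ([] : List Int) = [2,1,2,3,2,4,2,5] from by decide,
    show PySem.List.pyGetD pvWays 2 ([] : List Int) = [3,3,1,1,2,2,4,4,5,5] from by decide,
    PySem.Int.mod_natCast, PySem.List.pyGetD_natCast]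
  split_ifs <;>
    simp_all [PySem.List.pySetD_of_nonneg, List.set, PySem.List.pyGetD, PySem.List.pyGet?, PySem.List.pyIdx?]

-- A's combined pass, decomposed per pattern
theorem A_inv (tl : List Int) :
    ∀ (n : Nat) (c1 c2 c3 : Int),
      (PySem.List.enumerate tl (n : Int)).foldl (fun correct na =>
        (PySem.List.pyRange 0 (pvWays.length : Int) 1).foldl (fun correct wayIndex =>
          let way := PySem.List.pyGetD pvWays wayIndex []
          if na.2 = PySem.List.pyGetD way (PySem.Int.mod na.1 (way.length : Int)) 0 then
            PySem.List.pySetD correct wayIndex (PySem.List.pyGetD correct wayIndex 0 + 1)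
          else correct) correct) [c1, c2, c3]
      = [c1 + S [1,2,3,4,5] (n % 5) tl,
         c2 + S [2,1,2,3,2,4,2,5] (n % 8) tl,
         c3 + S [3,3,1,1,2,2,4,4,5,5] (n % 10) tl] := by
  induction tl with
  | nil => intro n c1 c2 c3; simp [PySem.List.enumerate, S]
  | cons a tl ih =>
    intro n c1 c2 c3
    rw [PySem.List.enumerate_cons]
    simp only [List.foldl_cons]
    rw [inner3 n a c1 c2 c3]
    rw [show ((n : Int) + 1) = ((n + 1 : Nat) : Int) from by push_cast; ring]
    rw [ih (n + 1)]
    simp only [S,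
      show ([1,2,3,4,5] : List Int).length = 5 from rfl,
      show ([2,1,2,3,2,4,2,5] : List Int).length = 8 from rfl,
      show ([3,3,1,1,2,2,4,4,5,5] : List Int).length = 10 from rfl,
      show (n + 1) % 5 = (n % 5 + 1) % 5 from by omega,
      show (n + 1) % 8 = (n % 8 + 1) % 8 from by omega,
      show (n + 1) % 10 = (n % 10 + 1) % 10 from by omega,
      List.cons.injEq, and_true]
    refine ⟨by ring, by ring, by ring⟩

-- the two final selections agree on any 3-element score list
theorem sel3_eq (s1 s2 s3 : Int) :
    (PySem.List.pyRange 0 ((([s1,s2,s3] : List Int).length : Nat) : Int) 1).foldl (fun acc i =>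
      match PySem.List.max? [s1,s2,s3] (fun x => x) with
      | some m => if PySem.List.pyGetD [s1,s2,s3] i 0 = m then acc ++ [i + 1] else acc
      | none => acc) []
    = match PySem.List.max? [s1,s2,s3] (fun x => x) with
      | none => []
      | some m => (PySem.List.enumerate [s1,s2,s3]).foldl
          (fun acc is => if is.2 = m then acc ++ [is.1 + 1] else acc) [] := by
  cases hmax : PySem.List.max? [s1,s2,s3] (fun x => x) with
  | none =>
    rw [PySem.List.max?_eq_none_iff] at hmax
    cases hmax
  | some m =>
    rw [show ((([s1,s2,s3] : List Int).length : Nat) : Int) = 3 from rfl,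
        show PySem.List.pyRange 0 3 1 = [0,1,2] from by decide]
    simp [PySem.List.enumerate_cons, PySem.List.enumerate_nil, List.foldl_cons,
      PySem.List.pyGetD, PySem.List.pyGet?, PySem.List.pyIdx?]

-- ===== VERDICT (by name: the statement is the Claim_ definition above) =====
theorem solution_spec : Claim_equal_solution := by
  intro answers _
  unfold Spec_solution
  simp only [solution, solution_alt]
  have hA := A_inv answers 0 0 0 0
  simp only [Nat.cast_zero, Nat.zero_mod, zero_add] at hA
  rw [show List.replicate pvWays.length (0 : Int) = [0, 0, 0] from rfl, hA]
  rw [show pvWays = [[1,2,3,4,5],[2,1,2,3,2,4,2,5],[3,3,1,1,2,2,4,4,5,5]] from rfl]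
  simp only [List.map]
  rw [cycScore_eq [1,2,3,4,5] answers (by decide),
      cycScore_eq [2,1,2,3,2,4,2,5] answers (by decide),
      cycScore_eq [3,3,1,1,2,2,4,4,5,5] answers (by decide)]
  exact sel3_eq _ _ _
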